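-- pv_equiv track=rewrite | github.com/boris-szl/cs-hsg | cs_hs21/coll/a4/a4.py | group_students
-- ===== SOURCE A (Python) =====
-- def group_students(students, n=2):# n steht für Anzahl der mitlgieder
-- 	students = students
-- 	if isinstance(students, list):
-- 		l = len(students)
-- 		if l % n == 0:
-- 			return [students[i*l//n:(i+1)*l//n] for i in range(n)]
-- 		elif len(students) != 0:
-- 			students.append("__EMPTY__")
-- 			return group_students(students)
-- ===== SOURCE B (Python) =====
-- def group_students(students, n=2):
--     if not isinstance(students, list):
--         return None
--     if len(students) % n != 0:
--         # normalize: pad once (as the original always appends before recursing),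
--         # then pad until even, and split into 2 groups
--         students.append("__EMPTY__")
--         while len(students) % 2 != 0:
--             students.append("__EMPTY__")
--         n = 2
--     l = len(students)
--     out = []
--     start = 0
--     for i in range(1, n + 1):
--         end = i * l // n
--         out.append(students[start:end])
--         start = end
--     return out
-- ===== Notes on version B (the rewrite author's own statement) =====
-- stated objective: alternative
-- what changed: Replaces the recursion (which resets n to 2 after an in-place pad) by an iterative normalize-then-split: pad once plus a parity while-loop, then a single accumulator loop over running slice boundaries instead of the range comprehension; same cost, different structure.
import Mathlib
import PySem

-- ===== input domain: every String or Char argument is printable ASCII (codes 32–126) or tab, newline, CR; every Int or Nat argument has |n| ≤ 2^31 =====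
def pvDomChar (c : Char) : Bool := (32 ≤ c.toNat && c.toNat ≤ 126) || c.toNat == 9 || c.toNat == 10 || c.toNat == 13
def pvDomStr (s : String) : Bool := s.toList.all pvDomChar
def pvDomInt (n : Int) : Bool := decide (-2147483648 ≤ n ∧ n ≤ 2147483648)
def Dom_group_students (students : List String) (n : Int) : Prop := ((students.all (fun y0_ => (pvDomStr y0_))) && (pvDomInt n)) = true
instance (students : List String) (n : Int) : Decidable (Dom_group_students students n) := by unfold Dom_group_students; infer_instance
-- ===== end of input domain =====

-- B replaces A's recursion (pad in place, recurse with n reset to 2) by an iterative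
-- normalize-then-split with a running slice boundary; equivalence is about the RETURN
-- value only (the Python A and B both append padding to the argument list in place).

-- ===== PORT A =====
-- Literal port of A: comprehension over range(n) when l % n == 0, otherwise append
-- "__EMPTY__" and recurse with the default n = 2.  The recursion is rendered with a
-- fuel counter (fuel 3 always suffices: the recursion resets n to 2, and appending
-- flips parity, so A recurses at most twice); the fuel-0 and fall-through branches
-- render Python's implicit None (unreachable for n ≠ 0) as [].
def groupAuxA : Nat → List String → Int → List (List String)
  | 0, _, _ => []
  | f + 1, students, n =>
    let l : Int := students.length
    if PySem.Int.mod l n = 0 then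
      (PySem.List.pyRange 0 n 1).map (fun i =>
        PySem.List.slice students (some (PySem.Int.floordiv (i * l) n))
          (some (PySem.Int.floordiv ((i + 1) * l) n)))
    else if l ≠ 0 then
      groupAuxA f (students ++ ["__EMPTY__"]) 2
    else
      []

def group_students (students : List String) (n : Int) : List (List String) :=
  groupAuxA 3 students n

-- ===== PORT B =====
-- B's while-loop 'while len(students) % 2 != 0: students.append("__EMPTY__")',
-- again with fuel (2 suffices: one append makes the length even).
def padEvenAux : Nat → List String → List String
  | 0, s => s
  | f + 1, s =>
    if PySem.Int.mod (s.length : Int) 2 ≠ 0 then padEvenAux f (s ++ ["__EMPTY__"]) else s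

def padEven (s : List String) : List String := padEvenAux 2 s

def group_students_alt (students : List String) (n : Int) : List (List String) :=
  let sm : List String × Int :=
    if PySem.Int.mod (students.length : Int) n ≠ 0 then
      (padEven (students ++ ["__EMPTY__"]), 2)
    else (students, n)
  let s := sm.1
  let m := sm.2
  let l : Int := s.length
  ((PySem.List.pyRange 1 (m + 1) 1).foldl
      (fun (acc : List (List String) × Int) i =>
        let e := PySem.Int.floordiv (i * l) m
        (acc.1 ++ [PySem.List.slice s (some acc.2) (some e)], e))
      ([], 0)).1

-- ===== PRECONDITION & SPEC =====
-- Pre_ excludes exactly n = 0, on which the Python A raises ZeroDivisionError (l % n).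
def Pre_group_students (students : List String) (n : Int) : Prop := n ≠ 0
instance (students : List String) (n : Int) : Decidable (Pre_group_students students n) := by unfold Pre_group_students; infer_instance
def pvWitness_group_students : List String × Int := (["ann", "bob", "cid"], 2)

def Spec_group_students (students : List String) (n : Int) (out : List (List String)) : Prop := out = group_students_alt students n
instance (students : List String) (n : Int) (out : List (List String)) : Decidable (Spec_group_students students n out) := by unfold Spec_group_students; infer_instance

-- ===== CLAIM (what is proved, stated in full; the proofs are below) =====
def Claim_equal_group_students : Prop := ∀ (students : List String) (n : Int), Dom_group_students students n → Pre_group_students students n → Spec_group_students students n (group_students students n)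

-- ===== LEMMAS AND PROOFS =====

-- B's fold appended-slices characterisation: chaining the running boundary
def chainSlices (s : List String) (l m : Int) : List Int → Int → List (List String)
  | [], _ => []
  | i :: t, start =>
      PySem.List.slice s (some start) (some (PySem.Int.floordiv (i * l) m))
        :: chainSlices s l m t (PySem.Int.floordiv (i * l) m)

theorem foldl_chain (s : List String) (l m : Int) (r : List Int)
    (acc : List (List String)) (start : Int) :
    (r.foldl (fun (acc : List (List String) × Int) i =>
        let e := PySem.Int.floordiv (i * l) m
        (acc.1 ++ [PySem.List.slice s (some acc.2) (some e)], e)) (acc, start)).1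
      = acc ++ chainSlices s l m r start := by
  induction r generalizing acc start with
  | nil => simp [chainSlices]
  | cons i t ih => simp [chainSlices, ih, List.append_assoc]

theorem chain_eq_map (s : List String) (l m : Int) (k : Nat) :
    ∀ i : Int, chainSlices s l m (PySem.List.pyRange i (i + k) 1) (PySem.Int.floordiv ((i - 1) * l) m)
      = (PySem.List.pyRange (i - 1) (i - 1 + k) 1).map (fun j =>
          PySem.List.slice s (some (PySem.Int.floordiv (j * l) m))
            (some (PySem.Int.floordiv ((j + 1) * l) m))) := by
  induction k with
  | zero =>
      intro i
      rw [PySem.List.pyRange_one_eq_nil (by omega), PySem.List.pyRange_one_eq_nil (by omega)]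
      simp [chainSlices]
  | succ k ih =>
      intro i
      rw [PySem.List.pyRange_one_cons (by omega), PySem.List.pyRange_one_cons (a := i - 1) (by omega)]
      simp only [chainSlices, List.map_cons]
      have h1 : i - 1 + 1 = i := by ring
      have h2 : (i + 1) - 1 = i := by ring
      have h3 : i + (k + 1 : Nat) = (i + 1) + (k : Nat) := by push_cast; ring
      have h4 : i - 1 + (k + 1 : Nat) = i - 1 + 1 + (k : Nat) := by push_cast; ring
      rw [h1, h3, h4, h1]
      congr 1
      have := ih (i + 1)
      rw [h2] at this
      exact this

-- B's fold over range(1, m+1) equals A's comprehension over range(m)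
theorem fold_eq_comprehension (s : List String) (l m : Int) :
    ((PySem.List.pyRange 1 (m + 1) 1).foldl
        (fun (acc : List (List String) × Int) i =>
          let e := PySem.Int.floordiv (i * l) m
          (acc.1 ++ [PySem.List.slice s (some acc.2) (some e)], e))
        ([], 0)).1
      = (PySem.List.pyRange 0 m 1).map (fun j =>
          PySem.List.slice s (some (PySem.Int.floordiv (j * l) m))
            (some (PySem.Int.floordiv ((j + 1) * l) m))) := by
  by_cases hm : m ≤ 0
  · rw [PySem.List.pyRange_one_eq_nil (by omega), PySem.List.pyRange_one_eq_nil (by omega)]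
    simp
  · have hm' : 0 < m := by omega
    have h0 : (0 : Int) = PySem.Int.floordiv ((1 - 1) * l) m := by
      simp [PySem.Int.floordiv_eq_ediv_of_pos hm']
    conv_lhs => rw [h0]
    rw [foldl_chain]
    have hk : m + 1 = 1 + (m.toNat : Int) := by omega
    rw [hk]
    rw [chain_eq_map s l m m.toNat 1]
    have hb : (1 : Int) - 1 + (m.toNat : Int) = m := by omega
    have ha : (1 : Int) - 1 = 0 := by norm_num
    rw [hb, ha]
    simp

theorem mod_two_nat (s : List String) :
    PySem.Int.mod ((s.length : Int)) 2 = (((s.length % 2 : Nat)) : Int) := by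
  exact_mod_cast PySem.Int.mod_natCast s.length 2

-- padEven on an even-length list is the identity; on odd it appends once
theorem padEvenAux_even (f : Nat) (s : List String) (h : s.length % 2 = 0) :
    padEvenAux f s = s := by
  cases f with
  | zero => rfl
  | succ f =>
      rw [padEvenAux, mod_two_nat, h]
      simp

theorem padEven_even (s : List String) (h : s.length % 2 = 0) : padEven s = s :=
  padEvenAux_even 2 s h

theorem padEven_odd (s : List String) (h : s.length % 2 = 1) :
    padEven s = s ++ ["__EMPTY__"] := by
  have heven : ((s ++ ["__EMPTY__"]).length) % 2 = 0 := by
    simp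
    omega
  show padEvenAux (1 + 1) s = s ++ ["__EMPTY__"]
  rw [padEvenAux, mod_two_nat, h, if_pos (by simp)]
  exact padEvenAux_even 1 _ heven

-- branch lemmas for the two ports
theorem groupAuxA_mod_eq (f : Nat) (students : List String) (n : Int)
    (h : PySem.Int.mod ((students.length : Int)) n = 0) :
    groupAuxA (f + 1) students n
      = (PySem.List.pyRange 0 n 1).map (fun i =>
          PySem.List.slice students (some (PySem.Int.floordiv (i * (students.length : Int)) n))
            (some (PySem.Int.floordiv ((i + 1) * (students.length : Int)) n))) := by
  rw [groupAuxA]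
  simp only [h, if_pos]

theorem groupAuxA_mod_ne (f : Nat) (students : List String) (n : Int)
    (h : ¬ PySem.Int.mod ((students.length : Int)) n = 0)
    (hl : ((students.length : Int)) ≠ 0) :
    groupAuxA (f + 1) students n = groupAuxA f (students ++ ["__EMPTY__"]) 2 := by
  rw [groupAuxA]
  simp only [h, if_false, hl, ne_eq, not_false_eq_true, if_true]

theorem alt_mod_eq (students : List String) (n : Int)
    (h : PySem.Int.mod ((students.length : Int)) n = 0) :
    group_students_alt students n
      = (PySem.List.pyRange 0 n 1).map (fun i =>
          PySem.List.slice students (some (PySem.Int.floordiv (i * (students.length : Int)) n))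
            (some (PySem.Int.floordiv ((i + 1) * (students.length : Int)) n))) := by
  rw [group_students_alt]
  simp only [h, ne_eq, not_true_eq_false, if_false]
  exact fold_eq_comprehension students (students.length : Int) n

theorem alt_mod_ne (students : List String) (n : Int)
    (h : ¬ PySem.Int.mod ((students.length : Int)) n = 0) :
    group_students_alt students n
      = (PySem.List.pyRange 0 2 1).map (fun i =>
          let p := padEven (students ++ ["__EMPTY__"])
          PySem.List.slice p (some (PySem.Int.floordiv (i * (p.length : Int)) 2))
            (some (PySem.Int.floordiv ((i + 1) * (p.length : Int)) 2))) := by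
  rw [group_students_alt]
  simp only [h, ne_eq, not_false_eq_true, if_true]
  exact fold_eq_comprehension _ _ 2

-- ===== VERDICT (by name: the statement is the Claim_ definition above) =====
theorem group_students_spec : Claim_equal_group_students := by
  intro students n _ hn
  show group_students students n = group_students_alt students n
  by_cases h : PySem.Int.mod ((students.length : Int)) n = 0
  · rw [alt_mod_eq students n h]
    exact groupAuxA_mod_eq 2 students n h
  · have hl : ((students.length : Int)) ≠ 0 := by
      intro h0
      exact h (by rw [h0]; exact (PySem.Int.mod_eq_zero_iff_dvd 0 n).mpr (dvd_zero n))
    rw [alt_mod_ne students n h]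
    have e1 : group_students students n = groupAuxA (1 + 1) (students ++ ["__EMPTY__"]) 2 :=
      groupAuxA_mod_ne 2 students n h hl
    rw [e1]
    set s1 := students ++ ["__EMPTY__"] with hs1
    by_cases hp : s1.length % 2 = 0
    · rw [padEven_even s1 hp]
      exact groupAuxA_mod_eq 1 s1 2 (by rw [mod_two_nat, hp]; rfl)
    · have hodd : s1.length % 2 = 1 := by omega
      have h2 : ¬ PySem.Int.mod ((s1.length : Int)) 2 = 0 := by
        rw [mod_two_nat, hodd]
        simp
      rw [padEven_odd s1 hodd]
      rw [groupAuxA_mod_ne 1 s1 2 h2 (by simp [hs1]; omega)]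
      exact groupAuxA_mod_eq 0 (s1 ++ ["__EMPTY__"]) 2 (by rw [mod_two_nat]; simp; omega)
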